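-- pv_equiv track=rewrite | github.com/khaledhassann/QR-Code-Reader | correction.py | find_points_with_xMax
-- ===== SOURCE A (Python) =====
-- def find_points_with_xMax (cont):
--
--     max_x = 0
--     max_points = []
--     for point in cont:
--         if point[1] >= max_x:
--             max_x = point[1]
--             max_points.append(point)
--     return max_points
-- ===== SOURCE B (Python) =====
-- def find_points_with_xMax(cont):
--     pts = list(cont)
--     prefix = [0]
--     for p in pts:
--         prefix.append(max(prefix[-1], p[1]))
--     return [p for p, m in zip(pts, prefix) if p[1] >= m]
-- ===== Notes on version B (the rewrite author's own statement) =====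
-- stated objective: alternative
-- what changed: Replaces the single stateful scan (mutating max_x and appending in one loop) with a build-a-prefix-running-max-table pass followed by a zip-and-filter pass.
import Mathlib
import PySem

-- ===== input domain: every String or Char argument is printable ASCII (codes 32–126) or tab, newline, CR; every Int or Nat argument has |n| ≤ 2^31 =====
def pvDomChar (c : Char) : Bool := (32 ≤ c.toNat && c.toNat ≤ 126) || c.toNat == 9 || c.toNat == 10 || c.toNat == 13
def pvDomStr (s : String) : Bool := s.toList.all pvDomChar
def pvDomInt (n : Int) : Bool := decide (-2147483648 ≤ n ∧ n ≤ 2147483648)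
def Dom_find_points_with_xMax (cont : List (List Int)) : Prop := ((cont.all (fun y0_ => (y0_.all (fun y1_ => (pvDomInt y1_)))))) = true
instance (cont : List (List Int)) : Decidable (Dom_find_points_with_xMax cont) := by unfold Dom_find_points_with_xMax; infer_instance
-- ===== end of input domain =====

-- B replaces A's single stateful scan by a prefix-running-max table followed by a zip-and-filter pass (alternative decomposition, same cost).


-- ===== PORT A =====
-- A: one loop keeping (max_x, max_points); point[1] ported via pyGet? (getD 0 is unreachable under Pre_).
def find_points_with_xMax (cont : List (List Int)) : List (List Int) :=
  (cont.foldl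
    (fun (st : Int × List (List Int)) point =>
      let y := (PySem.List.pyGet? point 1).getD 0
      if y ≥ st.1 then (y, st.2 ++ [point]) else st)
    (0, [])).2

-- ===== PORT B =====
-- B: prefix running-max table (scanl = the append loop with initial [0]), then zip-filter-map.
def find_points_with_xMax_alt (cont : List (List Int)) : List (List Int) :=
  let prefix_ := List.scanl (fun m p => max m ((PySem.List.pyGet? p 1).getD 0)) 0 cont
  ((cont.zip prefix_).filter (fun pm => (PySem.List.pyGet? pm.1 1).getD 0 ≥ pm.2)).map Prod.fst

-- ===== PRECONDITION & SPEC =====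
-- Pre_ excludes exactly the inputs containing a point with fewer than 2 coordinates, on which point[1] raises IndexError in both A and B.
def Pre_find_points_with_xMax (cont : List (List Int)) : Prop :=
  ∀ p ∈ cont, 2 ≤ p.length
instance (cont : List (List Int)) : Decidable (Pre_find_points_with_xMax cont) := by unfold Pre_find_points_with_xMax; infer_instance
def pvWitness_find_points_with_xMax : List (List Int) := [[1, 2], [3, 1], [0, 5]]
def Spec_find_points_with_xMax (cont : List (List Int)) (out : List (List Int)) : Prop := out = find_points_with_xMax_alt cont
instance (cont : List (List Int)) (out : List (List Int)) : Decidable (Spec_find_points_with_xMax cont out) := by unfold Spec_find_points_with_xMax; infer_instance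

-- ===== CLAIM (what is proved, stated in full; the proofs are below) =====
def Claim_equal_find_points_with_xMax : Prop := ∀ (cont : List (List Int)), Dom_find_points_with_xMax cont → Pre_find_points_with_xMax cont → Spec_find_points_with_xMax cont (find_points_with_xMax cont)

-- ===== LEMMAS AND PROOFS =====
lemma pv_fold_eq_scan (cont : List (List Int)) (m : Int) (acc : List (List Int)) :
    (cont.foldl
      (fun (st : Int × List (List Int)) point =>
        let y := (PySem.List.pyGet? point 1).getD 0
        if y ≥ st.1 then (y, st.2 ++ [point]) else st)
      (m, acc)).2
    = acc ++ ((cont.zip (List.scanl (fun m p => max m ((PySem.List.pyGet? p 1).getD 0)) m cont)).filter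
        (fun pm => (PySem.List.pyGet? pm.1 1).getD 0 ≥ pm.2)).map Prod.fst := by
  induction cont generalizing m acc with
  | nil => simp
  | cons p ps ih =>
    simp only [List.foldl_cons, List.scanl_cons, List.zip_cons_cons, List.filter_cons]
    by_cases h : (PySem.List.pyGet? p 1).getD 0 ≥ m
    · have hmax : max m ((PySem.List.pyGet? p 1).getD 0) = (PySem.List.pyGet? p 1).getD 0 :=
        max_eq_right h
      simp only [h, if_pos, decide_true, hmax, List.map_cons]
      rw [ih]
      simp
    · have hmax : max m ((PySem.List.pyGet? p 1).getD 0) = m := max_eq_left (le_of_not_ge h)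
      simp only [h, decide_false, hmax, if_false, Bool.false_eq_true]
      rw [ih]

-- ===== VERDICT (by name: the statement is the Claim_ definition above) =====
theorem find_points_with_xMax_spec : Claim_equal_find_points_with_xMax := by
  intro cont _ _
  unfold Spec_find_points_with_xMax find_points_with_xMax find_points_with_xMax_alt
  simpa using pv_fold_eq_scan cont 0 []
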